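-- pv_equiv track=rewrite | github.com/oaustegard/transformer-vm | transformer_vm/wasm/reference.py | _add_carries
-- ===== SOURCE A (Python) =====
-- def _add_carries(a, b):
--     carries = []
--     carry = 0
--     for i in range(4):
--         s = ((a >> (8 * i)) & 0xFF) + ((b >> (8 * i)) & 0xFF) + carry
--         carry = 1 if s >= 256 else 0
--         carries.append(carry)
--     return carries
-- ===== SOURCE B (Python) =====
-- def _add_carries(a, b):
--     carries = []
--     for i in range(4):
--         shift = 8 * (i + 1)
--         mask = (1 << shift) - 1
--         carries.append(((a & mask) + (b & mask)) >> shift)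
--     return carries
-- ===== Notes on version B (the rewrite author's own statement) =====
-- stated objective: alternative
-- what changed: Replaces the carry-propagating accumulator (each iteration's carry feeds the next) by four independent per-boundary computations: the carry out of byte i is read off directly as ((a & mask) + (b & mask)) >> (8*(i+1)) with mask = 2^(8*(i+1))-1, so no running carry state exists.
import Mathlib
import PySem

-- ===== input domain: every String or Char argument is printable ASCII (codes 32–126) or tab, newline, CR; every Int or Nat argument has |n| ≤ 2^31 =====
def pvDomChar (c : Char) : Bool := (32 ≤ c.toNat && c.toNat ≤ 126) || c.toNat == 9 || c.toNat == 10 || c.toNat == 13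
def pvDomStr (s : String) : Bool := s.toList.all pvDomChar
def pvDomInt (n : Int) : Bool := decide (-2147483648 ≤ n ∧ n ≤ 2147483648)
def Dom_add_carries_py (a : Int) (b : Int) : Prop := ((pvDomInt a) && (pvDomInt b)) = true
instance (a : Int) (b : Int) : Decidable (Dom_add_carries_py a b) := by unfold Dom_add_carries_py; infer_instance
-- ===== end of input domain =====

-- B drops A's running-carry accumulator: each byte-boundary carry is computed independently from the low bytes of a and b (alternative decomposition, same cost).
-- ===== PORT A =====
-- carries = []; carry = 0; for i in range(4): s = ((a >> 8*i) & 0xFF) + ((b >> 8*i) & 0xFF) + carry; carry = 1 if s >= 256 else 0; carries.append(carry)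
def add_carries_py (a : Int) (b : Int) : List Int :=
  (((PySem.List.pyRange 0 4 1).foldl (fun (st : List Int × Int) (i : Int) =>
      let s : Int := PySem.Int.band (a >>> (8 * i).toNat) 255 +
                     PySem.Int.band (b >>> (8 * i).toNat) 255 + st.2
      let carry : Int := if s ≥ 256 then 1 else 0
      (st.1 ++ [carry], carry)) ([], 0))).1

-- ===== PORT B =====
-- for i in range(4): shift = 8*(i+1); mask = (1 << shift) - 1; carries.append(((a & mask) + (b & mask)) >> shift)
def add_carries_py_alt (a : Int) (b : Int) : List Int :=
  (PySem.List.pyRange 0 4 1).foldl (fun (carries : List Int) (i : Int) =>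
    let shift : Nat := (8 * (i + 1)).toNat
    let mask : Int := ((1 : Int) <<< shift) - 1
    carries ++ [(PySem.Int.band a mask + PySem.Int.band b mask) >>> shift]) []

-- ===== PRECONDITION & SPEC =====
def Spec_add_carries_py (a : Int) (b : Int) (out : List Int) : Prop := out = add_carries_py_alt a b
instance (a : Int) (b : Int) (out : List Int) : Decidable (Spec_add_carries_py a b out) := by unfold Spec_add_carries_py; infer_instance

-- ===== CLAIM (what is proved, stated in full; the proofs are below) =====
def Claim_equal_add_carries_py : Prop := ∀ (a : Int) (b : Int), Dom_add_carries_py a b → Spec_add_carries_py a b (add_carries_py a b)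

-- ===== LEMMAS AND PROOFS =====

-- Auxiliary: (-y-1) % M is the "complement" of y % M, for any positive modulus M.
theorem pv_neg_succ_emod (y M : Int) (hM : 0 < M) : (-y - 1) % M = M - 1 - y % M := by
  have hyd : y % M + M * (y / M) = y := Int.emod_add_mul_ediv y M
  have h1 : -y - 1 = (M - 1 - y % M) + M * (-(y / M) - 1) := by ring_nf; linarith [hyd]
  have hlt : y % M < M := Int.emod_lt_of_pos y hM
  have hge : 0 ≤ y % M := Int.emod_nonneg y (ne_of_gt hM)
  rw [h1, Int.add_mul_emod_self_left]
  exact Int.emod_eq_of_lt (by linarith) (by linarith)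

-- Python's `x & (2^k - 1)` (two's complement on negatives) is `x mod 2^k`.
theorem pv_band_mask (x : Int) (k : Nat) :
    PySem.Int.band x ((2 : Int) ^ k - 1) = x % (2 : Int) ^ k := by
  have h2 : ((2 : Int) ^ k) = ((2 ^ k : Nat) : Int) := by push_cast; ring
  have hM0 : 0 < (2 : Nat) ^ k := Nat.two_pow_pos k
  have hand : ∀ n : Nat, n &&& ((2 : Nat) ^ k - 1) = n % 2 ^ k :=
    fun n => Nat.and_two_pow_sub_one_eq_mod n k
  rw [h2]
  generalize hMk : (2 : Nat) ^ k = M at hM0 hand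
  unfold PySem.Int.band
  by_cases hx : 0 ≤ x
  · rw [if_pos hx, if_pos (by omega)]
    have hm : ((M : Int) - 1).toNat = M - 1 := by omega
    rw [hm, hand]
    push_cast [Int.emod_emod_of_dvd]
    rw [Int.toNat_of_nonneg hx]
  · rw [if_neg hx, if_pos (by omega)]
    have hm : ((M : Int) - 1).toNat = M - 1 := by omega
    rw [hm, Nat.and_comm, hand]
    have hn : ((-x - 1).toNat : Int) = -x - 1 := by omega
    have hr : (-x - 1).toNat % M < M := Nat.mod_lt _ hM0
    have hcast : (((M - 1 - (-x - 1).toNat % M : Nat)) : Int)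
        = (M : Int) - 1 - (((-x - 1).toNat % M : Nat) : Int) := by omega
    rw [hcast]
    have : (((-x - 1).toNat % M : Nat) : Int) = (-x - 1) % (M : Int) := by
      push_cast
      rw [hn]
    rw [this, pv_neg_succ_emod x (M : Int) (by exact_mod_cast hM0)]
    ring

-- Specialisations at the literal masks used by the ports.
theorem pv_band_255 (x : Int) : PySem.Int.band x 255 = x % 256 := by
  have h := pv_band_mask x 8; norm_num at h; exact h

theorem pv_band_65535 (x : Int) : PySem.Int.band x 65535 = x % 65536 := by
  have h := pv_band_mask x 16; norm_num at h; exact h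

theorem pv_band_16777215 (x : Int) : PySem.Int.band x 16777215 = x % 16777216 := by
  have h := pv_band_mask x 24; norm_num at h; exact h

theorem pv_band_4294967295 (x : Int) : PySem.Int.band x 4294967295 = x % 4294967296 := by
  have h := pv_band_mask x 32; norm_num at h; exact h

-- The four carry steps: A's accumulated carry equals B's direct quotient at each byte boundary.
theorem pv_c1 (a b : Int) : (if 256 ≤ a % 256 + b % 256 then (1 : Int) else 0)
    = (a % 256 + b % 256) / 256 := by split_ifs <;> omega

theorem pv_c2 (a b : Int) :
    (if 256 ≤ a / 256 % 256 + b / 256 % 256 + (a % 256 + b % 256) / 256 then (1 : Int) else 0)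
    = (a % 65536 + b % 65536) / 65536 := by
  have ha : a % 65536 = a % 256 + 256 * (a / 256 % 256) := by omega
  have hb : b % 65536 = b % 256 + 256 * (b / 256 % 256) := by omega
  split_ifs <;> omega

theorem pv_c3 (a b : Int) :
    (if 256 ≤ a / 65536 % 256 + b / 65536 % 256 + (a % 65536 + b % 65536) / 65536 then (1 : Int) else 0)
    = (a % 16777216 + b % 16777216) / 16777216 := by
  have ha : a % 16777216 = a % 65536 + 65536 * (a / 65536 % 256) := by omega
  have hb : b % 16777216 = b % 65536 + 65536 * (b / 65536 % 256) := by omega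
  split_ifs <;> omega

theorem pv_c4 (a b : Int) :
    (if 256 ≤ a / 16777216 % 256 + b / 16777216 % 256 + (a % 16777216 + b % 16777216) / 16777216 then (1 : Int) else 0)
    = (a % 4294967296 + b % 4294967296) / 4294967296 := by
  have ha : a % 4294967296 = a % 16777216 + 16777216 * (a / 16777216 % 256) := by omega
  have hb : b % 4294967296 = b % 16777216 + 16777216 * (b / 16777216 % 256) := by omega
  split_ifs <;> omega

-- ===== VERDICT (by name: the statement is the Claim_ definition above) =====
theorem add_carries_py_spec : Claim_equal_add_carries_py := by
  intro a b _
  unfold Spec_add_carries_py add_carries_py add_carries_py_alt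
  rw [show PySem.List.pyRange 0 4 1 = [0, 1, 2, 3] from by decide]
  simp only [List.foldl,
    show ((8 : Int) * 0).toNat = 0 from rfl, show ((8 : Int) * 1).toNat = 8 from rfl,
    show ((8 : Int) * 2).toNat = 16 from rfl, show ((8 : Int) * 3).toNat = 24 from rfl,
    show ((8 : Int) * (0 + 1)).toNat = 8 from rfl, show ((8 : Int) * (1 + 1)).toNat = 16 from rfl,
    show ((8 : Int) * (2 + 1)).toNat = 24 from rfl, show ((8 : Int) * (3 + 1)).toNat = 32 from rfl,
    show ((1 : Int) <<< (8 : Nat) - 1) = 255 from rfl, show ((1 : Int) <<< (16 : Nat) - 1) = 65535 from rfl,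
    show ((1 : Int) <<< (24 : Nat) - 1) = 16777215 from rfl, show ((1 : Int) <<< (32 : Nat) - 1) = 4294967295 from rfl,
    pv_band_255, pv_band_65535, pv_band_16777215, pv_band_4294967295,
    Int.shiftRight_eq_div_pow]
  norm_num
  rw [pv_c1 a b, pv_c2 a b, pv_c3 a b, pv_c4 a b]
  exact ⟨rfl, rfl, rfl, rfl⟩
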